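-- pv_equiv track=rewrite | github.com/Demiladepy/semantic | nli_engine.py | _are_sources_equivalent
-- ===== SOURCE A (Python) =====
-- def _are_sources_equivalent(source_a: str, source_b: str) -> bool:
--     """
--     Check if two sources are equivalent for resolution purposes.
--     E.g., "AP News" and "AP" are equivalent.
--     """
--     # Normalize sources
--     norm_a = source_a.lower().strip()
--     norm_b = source_b.lower().strip()
--
--     # Direct match
--     if norm_a == norm_b:
--         return True
--
--     # Check for common equivalences
--     equivalences = {
--         "ap news": ["ap", "associated press"],
--         "ap": ["ap news", "associated press"],
--         "reuters": ["reuters news"],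
--         "bloomberg": ["bloomberg terminal"],
--     }
--
--     for key, values in equivalences.items():
--         if norm_a == key and norm_b in values:
--             return True
--         if norm_b == key and norm_a in values:
--             return True
--
--     return False
-- ===== SOURCE B (Python) =====
-- _CANON = {
--     "ap news": "ap",
--     "ap": "ap",
--     "associated press": "ap",
--     "reuters": "reuters",
--     "reuters news": "reuters",
--     "bloomberg": "bloomberg",
--     "bloomberg terminal": "bloomberg",
-- }
--
--
-- def _are_sources_equivalent(source_a: str, source_b: str) -> bool:
--     norm_a = source_a.lower().strip()
--     norm_b = source_b.lower().strip()
--     return _CANON.get(norm_a, norm_a) == _CANON.get(norm_b, norm_b)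
-- ===== Notes on version B (the rewrite author's own statement) =====
-- stated objective: idiomatic
-- what changed: Replaced A's scan over a bidirectional equivalences table (with membership tests in the value lists) by a single canonical-form dict mapping every known alias to one representative; B normalizes both inputs and compares two lookups (falling back to the string itself), so the loop and the symmetric key/value checks disappear.
import Mathlib
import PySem

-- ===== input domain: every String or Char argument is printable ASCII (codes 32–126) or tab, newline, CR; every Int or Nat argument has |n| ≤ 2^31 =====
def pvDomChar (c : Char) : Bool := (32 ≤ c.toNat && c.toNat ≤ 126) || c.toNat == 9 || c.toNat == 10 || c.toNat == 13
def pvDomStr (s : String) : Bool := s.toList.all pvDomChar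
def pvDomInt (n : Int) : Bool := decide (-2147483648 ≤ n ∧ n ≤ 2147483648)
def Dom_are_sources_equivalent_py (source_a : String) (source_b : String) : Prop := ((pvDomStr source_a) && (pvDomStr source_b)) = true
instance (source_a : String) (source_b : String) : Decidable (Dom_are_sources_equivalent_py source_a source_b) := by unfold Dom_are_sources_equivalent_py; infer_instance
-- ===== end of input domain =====

-- B replaces A's scan over a bidirectional equivalence table by two lookups in a
-- canonical-form dict (each known alias maps to one representative); objective: idiomatic/simpler.

-- ===== PORT A =====
-- the literal dict 'equivalences' of A, in insertion order
def pvEquivalences : List (String × List String) :=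
  [("ap news", ["ap", "associated press"]),
   ("ap", ["ap news", "associated press"]),
   ("reuters", ["reuters news"]),
   ("bloomberg", ["bloomberg terminal"])]

-- the 'for key, values in equivalences.items()' loop with its early returns
def pvEquivLoop (norm_a norm_b : String) : List (String × List String) → Bool
  | [] => false
  | (key, values) :: rest =>
    if norm_a == key && values.contains norm_b then true
    else if norm_b == key && values.contains norm_a then true
    else pvEquivLoop norm_a norm_b rest

def are_sources_equivalent_py (source_a : String) (source_b : String) : Bool :=
  let norm_a := PySem.Str.strip (PySem.Str.lower source_a)
  let norm_b := PySem.Str.strip (PySem.Str.lower source_b)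
  if norm_a == norm_b then true
  else pvEquivLoop norm_a norm_b pvEquivalences

-- ===== PORT B =====
def pvCanon : PySem.Dict String String :=
  PySem.Dict.ofList
    [("ap news", "ap"), ("ap", "ap"), ("associated press", "ap"),
     ("reuters", "reuters"), ("reuters news", "reuters"),
     ("bloomberg", "bloomberg"), ("bloomberg terminal", "bloomberg")]

def are_sources_equivalent_py_alt (source_a : String) (source_b : String) : Bool :=
  let norm_a := PySem.Str.strip (PySem.Str.lower source_a)
  let norm_b := PySem.Str.strip (PySem.Str.lower source_b)
  pvCanon.getD norm_a norm_a == pvCanon.getD norm_b norm_b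

-- ===== PRECONDITION & SPEC =====
def Spec_are_sources_equivalent_py (source_a : String) (source_b : String) (out : Bool) : Prop := out = are_sources_equivalent_py_alt source_a source_b
instance (source_a : String) (source_b : String) (out : Bool) : Decidable (Spec_are_sources_equivalent_py source_a source_b out) := by unfold Spec_are_sources_equivalent_py; infer_instance

-- ===== CLAIM (what is proved, stated in full; the proofs are below) =====
def Claim_equal_are_sources_equivalent_py : Prop := ∀ (source_a : String) (source_b : String), Dom_are_sources_equivalent_py source_a source_b → Spec_are_sources_equivalent_py source_a source_b (are_sources_equivalent_py source_a source_b)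

-- ===== LEMMAS AND PROOFS =====
-- every string is one of the seven known aliases, or none of them
lemma pv_cases7 (s : String) :
    s = "ap news" ∨ s = "ap" ∨ s = "associated press" ∨ s = "reuters" ∨
    s = "reuters news" ∨ s = "bloomberg" ∨ s = "bloomberg terminal" ∨
    (s ≠ "ap news" ∧ "ap news" ≠ s ∧ s ≠ "ap" ∧ "ap" ≠ s ∧
     s ≠ "associated press" ∧ "associated press" ≠ s ∧ s ≠ "reuters" ∧ "reuters" ≠ s ∧
     s ≠ "reuters news" ∧ "reuters news" ≠ s ∧ s ≠ "bloomberg" ∧ "bloomberg" ≠ s ∧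
     s ≠ "bloomberg terminal" ∧ "bloomberg terminal" ≠ s) := by
  by_cases h1 : s = "ap news" <;> by_cases h2 : s = "ap" <;>
  by_cases h3 : s = "associated press" <;> by_cases h4 : s = "reuters" <;>
  by_cases h5 : s = "reuters news" <;> by_cases h6 : s = "bloomberg" <;>
  by_cases h7 : s = "bloomberg terminal" <;>
    simp_all [Ne, eq_comm]

lemma pv_canon_eq : pvCanon = PySem.Dict.mk
    [("ap news", "ap"), ("ap", "ap"), ("associated press", "ap"),
     ("reuters", "reuters"), ("reuters news", "reuters"),
     ("bloomberg", "bloomberg"), ("bloomberg terminal", "bloomberg")] := by decide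

-- A's direct-match test plus table scan coincides with B's canonical-form comparison
lemma pv_core (a b : String) :
    (if a == b then true else pvEquivLoop a b pvEquivalences)
      = (pvCanon.getD a a == pvCanon.getD b b) := by
  rcases pv_cases7 a with ha | ha | ha | ha | ha | ha | ha |
      ⟨a1, a1', a2, a2', a3, a3', a4, a4', a5, a5', a6, a6', a7, a7'⟩ <;>
    rcases pv_cases7 b with hb | hb | hb | hb | hb | hb | hb |
      ⟨b1, b1', b2, b2', b3, b3', b4, b4', b5, b5', b6, b6', b7, b7'⟩ <;>
    subst_vars <;>
    simp_all [pvEquivLoop, pvEquivalences, pv_canon_eq, PySem.Dict.getD,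
      PySem.Dict.get?, List.find?, Option.getD, beq_eq_decide]
-- ===== VERDICT (by name: the statement is the Claim_ definition above) =====
theorem are_sources_equivalent_py_spec : Claim_equal_are_sources_equivalent_py := by
  intro sa sb _
  unfold Spec_are_sources_equivalent_py are_sources_equivalent_py are_sources_equivalent_py_alt
  exact pv_core _ _
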